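-- pv_equiv track=rewrite | github.com/UMCUGenetics/rsync_to_rdisc | rsync_to_rdisc.py | get_upload_state
-- ===== SOURCE A (Python) =====
-- def get_upload_state(upload_result):
--     return_value = "ok"
--     for msg in upload_result:
--         if "error" in msg.lower():
--             return_value = "error"
--             break
--         elif "warning" in msg.lower():
--             return_value = "warning"
--     return return_value
-- ===== SOURCE B (Python) =====
-- def get_upload_state(upload_result):
--     if any("error" in msg.lower() for msg in upload_result):
--         return "error"
--     if any("warning" in msg.lower() for msg in upload_result):
--         return "warning"
--     return "ok"
-- ===== Notes on version B (the rewrite author's own statement) =====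
-- stated objective: idiomatic
-- what changed: Replaces the single stateful loop with an accumulator and break by two short-circuiting any() presence tests, exploiting that the result depends only on which keywords occur.
import Mathlib
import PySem

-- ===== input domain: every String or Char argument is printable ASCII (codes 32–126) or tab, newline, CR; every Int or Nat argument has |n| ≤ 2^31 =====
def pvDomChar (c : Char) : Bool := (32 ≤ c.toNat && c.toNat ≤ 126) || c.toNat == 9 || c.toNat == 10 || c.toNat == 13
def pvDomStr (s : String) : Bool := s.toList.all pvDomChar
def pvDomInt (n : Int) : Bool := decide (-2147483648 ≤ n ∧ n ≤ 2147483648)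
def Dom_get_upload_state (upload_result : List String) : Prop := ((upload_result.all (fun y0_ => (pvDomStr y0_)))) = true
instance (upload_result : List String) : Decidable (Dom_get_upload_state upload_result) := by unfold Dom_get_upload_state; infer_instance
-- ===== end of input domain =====

-- B replaces A's stateful loop-with-break by two short-circuiting presence tests (idiomatic; same cost).

-- ===== PORT A =====
-- loop over upload_result carrying return_value; break on error
def get_upload_state_go (return_value : String) : List String → String
  | [] => return_value
  | msg :: rest =>
    if PySem.Str.isIn "error" (PySem.Str.lower msg) then "error"
    else if PySem.Str.isIn "warning" (PySem.Str.lower msg) then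
      get_upload_state_go "warning" rest
    else get_upload_state_go return_value rest

def get_upload_state (upload_result : List String) : String :=
  get_upload_state_go "ok" upload_result

-- ===== PORT B =====
def get_upload_state_alt (upload_result : List String) : String :=
  if upload_result.any (fun msg => PySem.Str.isIn "error" (PySem.Str.lower msg)) then "error"
  else if upload_result.any (fun msg => PySem.Str.isIn "warning" (PySem.Str.lower msg)) then "warning"
  else "ok"

-- ===== PRECONDITION & SPEC =====
def Spec_get_upload_state (upload_result : List String) (out : String) : Prop := out = get_upload_state_alt upload_result
instance (upload_result : List String) (out : String) : Decidable (Spec_get_upload_state upload_result out) := by unfold Spec_get_upload_state; infer_instance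

-- ===== CLAIM (what is proved, stated in full; the proofs are below) =====
def Claim_equal_get_upload_state : Prop := ∀ (upload_result : List String), Dom_get_upload_state upload_result → Spec_get_upload_state upload_result (get_upload_state upload_result)

-- ===== LEMMAS AND PROOFS =====
theorem go_eq (l : List String) (rv : String) :
    get_upload_state_go rv l =
      if l.any (fun msg => PySem.Str.isIn "error" (PySem.Str.lower msg)) then "error"
      else if l.any (fun msg => PySem.Str.isIn "warning" (PySem.Str.lower msg)) then "warning"
      else rv := by
  induction l generalizing rv with
  | nil => simp [get_upload_state_go]
  | cons msg rest ih =>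
    by_cases he : PySem.Chars.isIn ['e','r','r','o','r'] (PySem.Chars.lower msg.toList) = true
    · simp [get_upload_state_go, he]
    · by_cases hw : PySem.Chars.isIn ['w','a','r','n','i','n','g'] (PySem.Chars.lower msg.toList) = true
      · simp [get_upload_state_go, he, hw, ih]
      · simp [get_upload_state_go, he, hw, ih]

-- ===== VERDICT (by name: the statement is the Claim_ definition above) =====
theorem get_upload_state_spec : Claim_equal_get_upload_state := by
  intro ur _
  unfold Spec_get_upload_state get_upload_state get_upload_state_alt
  exact go_eq ur "ok"
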